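-- pv_equiv track=rewrite | github.com/jdoeun/Algorithm-Study | iceprins/241120/PGS_퍼즐_조각_채우기.py | make_array
-- ===== SOURCE A (Python) =====
-- def make_array(coord):
--     x, y = zip(*coord)
--     r, c = max(x) - min(x) + 1, max(y) - min(y) + 1
--     array = [[0] * c for _ in range(r)]
--
--     for i, j in coord:
--         i, j = i - min(x), j - min(y)
--         array[i][j] = 1
--
--     return array
-- ===== SOURCE B (Python) =====
-- def make_array(coord):
--     x, y = zip(*coord)
--     minx, maxx, miny, maxy = min(x), max(x), min(y), max(y)
--     pts = {(i, j) for i, j in coord}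
--     return [[1 if (i, j) in pts else 0 for j in range(miny, maxy + 1)]
--             for i in range(minx, maxx + 1)]
-- ===== Notes on version B (the rewrite author's own statement) =====
-- stated objective: simpler
-- what changed: Instead of allocating a zero grid and writing 1s at each of the n coordinates (recomputing min(x)/min(y) inside the loop), B builds a set of the coordinates once and produces the grid in a single comprehension that scans every cell and tests membership.
import Mathlib
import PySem

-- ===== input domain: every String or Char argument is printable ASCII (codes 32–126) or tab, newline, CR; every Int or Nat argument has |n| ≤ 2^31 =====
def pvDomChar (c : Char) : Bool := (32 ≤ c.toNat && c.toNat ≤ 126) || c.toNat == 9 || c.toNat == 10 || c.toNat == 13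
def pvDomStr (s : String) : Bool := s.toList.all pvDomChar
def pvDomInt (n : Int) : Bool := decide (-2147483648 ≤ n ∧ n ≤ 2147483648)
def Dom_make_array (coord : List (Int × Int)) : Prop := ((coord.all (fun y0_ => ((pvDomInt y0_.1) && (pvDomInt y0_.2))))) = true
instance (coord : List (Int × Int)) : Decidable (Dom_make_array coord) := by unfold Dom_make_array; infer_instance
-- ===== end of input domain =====

-- B replaces A's allocate-zero-grid-then-write-1s loop by a single per-cell scan testing
-- membership in a prebuilt set of the coordinates (simpler; same return value).

-- ===== PORT A =====
-- A: zero grid of shape r×c, then for each (i,j) in coord set array[i-min x][j-min y] = 1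
-- (Python recomputes min(x)/min(y) inside the loop; they are constant, ported as the same value).
def make_array (coord : List (Int × Int)) : List (List Int) :=
  let x := coord.map Prod.fst
  let y := coord.map Prod.snd
  let r := (PySem.List.max? x (fun v => v)).getD 0 - (PySem.List.min? x (fun v => v)).getD 0 + 1
  let c := (PySem.List.max? y (fun v => v)).getD 0 - (PySem.List.min? y (fun v => v)).getD 0 + 1
  let init := (PySem.List.pyRange 0 r 1).map (fun _ => List.replicate c.toNat 0)
  coord.foldl (fun arr p =>
    let i := p.1 - (PySem.List.min? x (fun v => v)).getD 0
    let j := p.2 - (PySem.List.min? y (fun v => v)).getD 0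
    PySem.List.pySetD arr i (PySem.List.pySetD (PySem.List.pyGetD arr i []) j 1)) init

-- ===== PORT B =====
-- B: set of coordinates, then one comprehension over all cells testing membership.
def make_array_alt (coord : List (Int × Int)) : List (List Int) :=
  let x := coord.map Prod.fst
  let y := coord.map Prod.snd
  let minx := (PySem.List.min? x (fun v => v)).getD 0
  let maxx := (PySem.List.max? x (fun v => v)).getD 0
  let miny := (PySem.List.min? y (fun v => v)).getD 0
  let maxy := (PySem.List.max? y (fun v => v)).getD 0
  let pts : PySem.Set (Int × Int) := PySem.Set.ofList coord
  (PySem.List.pyRange minx (maxx + 1) 1).map (fun i =>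
    (PySem.List.pyRange miny (maxy + 1) 1).map (fun j =>
      if PySem.Set.contains pts (i, j) then 1 else 0))

-- ===== PRECONDITION & SPEC =====
-- Pre_ excludes only the empty list, on which A raises ValueError (zip(*coord) unpacking).
def Pre_make_array (coord : List (Int × Int)) : Prop := coord ≠ []
instance (coord : List (Int × Int)) : Decidable (Pre_make_array coord) := by unfold Pre_make_array; infer_instance
def pvWitness_make_array : (List (Int × Int)) := [(1, -1), (2, 0)]

def Spec_make_array (coord : List (Int × Int)) (out : List (List Int)) : Prop := out = make_array_alt coord
instance (coord : List (Int × Int)) (out : List (List Int)) : Decidable (Spec_make_array coord out) := by unfold Spec_make_array; infer_instance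

-- ===== CLAIM (what is proved, stated in full; the proofs are below) =====
def Claim_equal_make_array : Prop := ∀ (coord : List (Int × Int)), Dom_make_array coord → Pre_make_array coord → Spec_make_array coord (make_array coord)

-- ===== LEMMAS AND PROOFS =====

/-- One update step of A's loop, with the two minima as parameters. -/
def pvStep (m1 m2 : Int) (arr : List (List Int)) (p : Int × Int) : List (List Int) :=
  PySem.List.pySetD arr (p.1 - m1)
    (PySem.List.pySetD (PySem.List.pyGetD arr (p.1 - m1) []) (p.2 - m2) 1)

/-- The fold of A's loop: lengths are preserved and each cell reads 1 exactly when
its (shifted) coordinate occurs in the remaining list. -/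
theorem pv_fold_char (m1 m2 : Int) (l : List (Int × Int)) :
    ∀ (arr : List (List Int)) (C : Nat),
    (∀ row ∈ arr, row.length = C) →
    (∀ p ∈ l, 0 ≤ p.1 - m1 ∧ (p.1 - m1).toNat < arr.length ∧
              0 ≤ p.2 - m2 ∧ (p.2 - m2).toNat < C) →
    (l.foldl (pvStep m1 m2) arr).length = arr.length ∧
    (∀ row ∈ l.foldl (pvStep m1 m2) arr, row.length = C) ∧
    (∀ i j : Nat, i < arr.length → j < C →
      ((l.foldl (pvStep m1 m2) arr).getD i []).getD j 0 =
        if ((i : Int) + m1, (j : Int) + m2) ∈ l then 1 else (arr.getD i []).getD j 0) := by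
  induction l with
  | nil => intro arr C hrow _; exact ⟨rfl, hrow, fun i j _ _ => by simp⟩
  | cons p t ih =>
    intro arr C hrow hb
    obtain ⟨h1, h2, h3, h4⟩ := hb p (by simp)
    have hlt : (p.1 - m1).toNat < arr.length := h2
    -- the updated array
    have hset : pvStep m1 m2 arr p =
        arr.set (p.1 - m1).toNat ((arr.getD (p.1 - m1).toNat []).set (p.2 - m2).toNat 1) := by
      unfold pvStep
      rw [PySem.List.pySetD_of_nonneg arr _ h1, PySem.List.pyGetD_of_nonneg arr _ h1,
          PySem.List.pySetD_of_nonneg _ _ h3]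
    have hlen' : (pvStep m1 m2 arr p).length = arr.length := by rw [hset]; simp
    have hrow' : ∀ row ∈ pvStep m1 m2 arr p, row.length = C := by
      rw [hset]
      intro row hrm
      rcases List.mem_or_eq_of_mem_set hrm with h | h
      · exact hrow _ h
      · subst h
        have : (arr.getD (p.1 - m1).toNat []).length = C := by
          have := hrow (arr.getD (p.1 - m1).toNat []) ?_
          · exact this
          · rw [List.getD_eq_getElem _ _ hlt]; exact List.getElem_mem hlt
        simpa [this]
    have hb' : ∀ q ∈ t, 0 ≤ q.1 - m1 ∧ (q.1 - m1).toNat < (pvStep m1 m2 arr p).length ∧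
               0 ≤ q.2 - m2 ∧ (q.2 - m2).toNat < C := by
      intro q hq
      have := hb q (by simp [hq])
      rwa [hlen']
    obtain ⟨ihlen, ihrow, ihcell⟩ := ih (pvStep m1 m2 arr p) C hrow' hb'
    refine ⟨by simp [List.foldl_cons, ihlen, hlen'], by simpa [List.foldl_cons] using ihrow, ?_⟩
    intro i j hi hj
    have hi' : i < (pvStep m1 m2 arr p).length := by rwa [hlen']
    rw [List.foldl_cons, ihcell i j hi' hj]
    -- cell of the updated array
    have hcellstep :
        ((pvStep m1 m2 arr p).getD i []).getD j 0 =
          if (p.1 - m1).toNat = i ∧ (p.2 - m2).toNat = j then 1 else (arr.getD i []).getD j 0 := by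
      rw [hset]
      by_cases hie : (p.1 - m1).toNat = i
      · subst hie
        have hrl : (arr.getD (p.1 - m1).toNat []).length = C :=
          hrow _ (by rw [List.getD_eq_getElem _ _ hlt]; exact List.getElem_mem hlt)
        by_cases hje : (p.2 - m2).toNat = j
        · subst hje
          have h4' : (p.2 - m2).toNat < (arr.getD (p.1 - m1).toNat []).length := by
            rw [hrl]; exact h4
          rw [List.getD_eq_getElem _ _ hlt] at h4'
          simp [List.getD_eq_getElem?_getD, hlt, h4']
        · simp [List.getD_eq_getElem?_getD, hlt, List.getElem?_set_ne hje, hje]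
      · simp [List.getD_eq_getElem?_getD, List.getElem?_set_ne hie, hie]
    rw [hcellstep]
    by_cases hmem : ((i : Int) + m1, (j : Int) + m2) ∈ t
    · simp [hmem]
    · by_cases heq : ((i : Int) + m1, (j : Int) + m2) = p
      · have e1 : (p.1 - m1).toNat = i := by
          have : p.1 = (i : Int) + m1 := by rw [← heq]
          omega
        have e2 : (p.2 - m2).toNat = j := by
          have : p.2 = (j : Int) + m2 := by rw [← heq]
          omega
        simp [heq, e1, e2]
      · have hne : ¬ ((p.1 - m1).toNat = i ∧ (p.2 - m2).toNat = j) := by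
          rintro ⟨e1, e2⟩
          apply heq
          have : p.1 = (i : Int) + m1 := by omega
          have : p.2 = (j : Int) + m2 := by omega
          ext <;> simp <;> omega
        simp [hmem, heq, hne]

theorem pv_main (coord : List (Int × Int)) (hpre : coord ≠ []) :
    make_array coord = make_array_alt coord := by
  unfold make_array make_array_alt
  have hx : coord.map Prod.fst ≠ [] := by simpa using hpre
  have hy : coord.map Prod.snd ≠ [] := by simpa using hpre
  obtain ⟨m1, hm1⟩ : ∃ m, PySem.List.min? (coord.map Prod.fst) (fun v => v) = some m := by
    cases h : PySem.List.min? (coord.map Prod.fst) (fun v => v) with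
    | none => exact absurd ((PySem.List.min?_eq_none_iff _ _).mp h) hx
    | some m => exact ⟨m, rfl⟩
  obtain ⟨M1, hM1⟩ : ∃ m, PySem.List.max? (coord.map Prod.fst) (fun v => v) = some m := by
    cases h : PySem.List.max? (coord.map Prod.fst) (fun v => v) with
    | none => exact absurd ((PySem.List.max?_eq_none_iff _ _).mp h) hx
    | some m => exact ⟨m, rfl⟩
  obtain ⟨m2, hm2⟩ : ∃ m, PySem.List.min? (coord.map Prod.snd) (fun v => v) = some m := by
    cases h : PySem.List.min? (coord.map Prod.snd) (fun v => v) with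
    | none => exact absurd ((PySem.List.min?_eq_none_iff _ _).mp h) hy
    | some m => exact ⟨m, rfl⟩
  obtain ⟨M2, hM2⟩ : ∃ m, PySem.List.max? (coord.map Prod.snd) (fun v => v) = some m := by
    cases h : PySem.List.max? (coord.map Prod.snd) (fun v => v) with
    | none => exact absurd ((PySem.List.max?_eq_none_iff _ _).mp h) hy
    | some m => exact ⟨m, rfl⟩
  simp only [hm1, hM1, hm2, hM2, Option.getD_some]
  -- bounds of the extrema
  have hm1le : ∀ p ∈ coord, m1 ≤ p.1 := fun p hp =>
    PySem.List.min?_isMin hm1 _ (List.mem_map_of_mem hp)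
  have hM1ge : ∀ p ∈ coord, p.1 ≤ M1 := fun p hp =>
    PySem.List.max?_isMax hM1 _ (List.mem_map_of_mem hp)
  have hm2le : ∀ p ∈ coord, m2 ≤ p.2 := fun p hp =>
    PySem.List.min?_isMin hm2 _ (List.mem_map_of_mem hp)
  have hM2ge : ∀ p ∈ coord, p.2 ≤ M2 := fun p hp =>
    PySem.List.max?_isMax hM2 _ (List.mem_map_of_mem hp)
  obtain ⟨q, hq⟩ : ∃ q, q ∈ coord := List.exists_mem_of_ne_nil coord hpre
  have hm1M1 : m1 ≤ M1 := le_trans (hm1le q hq) (hM1ge q hq)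
  have hm2M2 : m2 ≤ M2 := le_trans (hm2le q hq) (hM2ge q hq)
  set R : Int := M1 - m1 + 1 with hR
  set C : Int := M2 - m2 + 1 with hC
  set init : List (List Int) :=
    (PySem.List.pyRange 0 R 1).map (fun _ => List.replicate C.toNat 0) with hinit
  have hinitlen : init.length = R.toNat := by
    simp [hinit, PySem.List.length_pyRange_one]
  have hinitrow : ∀ row ∈ init, row.length = C.toNat := by
    intro row hrm
    rw [hinit] at hrm
    obtain ⟨a, -, rfl⟩ := List.mem_map.mp hrm
    simp
  have hbnd : ∀ p ∈ coord, 0 ≤ p.1 - m1 ∧ (p.1 - m1).toNat < init.length ∧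
      0 ≤ p.2 - m2 ∧ (p.2 - m2).toNat < C.toNat := by
    intro p hp
    have h1 := hm1le p hp; have h2 := hM1ge p hp
    have h3 := hm2le p hp; have h4 := hM2ge p hp
    rw [hinitlen]
    refine ⟨by omega, by omega, by omega, by omega⟩
  have hstep : (fun (arr : List (List Int)) (p : Int × Int) =>
      PySem.List.pySetD arr (p.1 - m1)
        (PySem.List.pySetD (PySem.List.pyGetD arr (p.1 - m1) []) (p.2 - m2) 1)) =
      pvStep m1 m2 := rfl
  rw [hstep]
  obtain ⟨hflen, hfrow, hfcell⟩ := pv_fold_char m1 m2 coord init C.toNat hinitrow hbnd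
  apply List.ext_getElem
  · rw [hflen, hinitlen]
    simp [PySem.List.length_pyRange_one]
    omega
  intro i hi1 hi2
  have hiR : i < R.toNat := by rw [hflen, hinitlen] at hi1; exact hi1
  apply List.ext_getElem
  · have hL : (List.foldl (pvStep m1 m2) init coord)[i].length = C.toNat :=
      hfrow _ (List.getElem_mem hi1)
    rw [hL]
    simp [PySem.List.length_pyRange_one]
    omega
  intro j hj1 hj2
  have hjC : j < C.toNat := by
    have hL : (List.foldl (pvStep m1 m2) init coord)[i].length = C.toNat :=
      hfrow _ (List.getElem_mem hi1)
    rwa [hL] at hj1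
  -- left side via the fold characterisation
  have hil : i < init.length := by rwa [hinitlen]
  have hcell := hfcell i j hil hjC
  have hgetL : (List.foldl (pvStep m1 m2) init coord)[i][j] =
      ((List.foldl (pvStep m1 m2) init coord).getD i []).getD j 0 := by
    rw [List.getD_eq_getElem _ _ hi1, List.getD_eq_getElem _ _ hj1]
  have hinitcell : (init.getD i []).getD j 0 = 0 := by
    have hrowi : init.getD i [] = List.replicate C.toNat 0 := by
      rw [List.getD_eq_getElem _ _ hil]
      simp [hinit]
    rw [hrowi]
    simp [List.getD_eq_getElem?_getD, List.getElem?_replicate]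
    split <;> rfl
  refine hgetL.trans ?_
  rw [hcell, hinitcell]
  -- right side
  have hiR' : i < (PySem.List.pyRange m1 (M1 + 1) 1).length := by
    simp [PySem.List.length_pyRange_one]; omega
  have hjC' : j < (PySem.List.pyRange m2 (M2 + 1) 1).length := by
    simp [PySem.List.length_pyRange_one]; omega
  simp only [List.getElem_map, PySem.List.getElem_pyRange_one]
  by_cases hc : ((i : Int) + m1, (j : Int) + m2) ∈ coord
  · simp only [if_pos hc]
    simp [show (m1 + (i : Int), m2 + (j : Int)) ∈ coord from by
      simpa [Int.add_comm] using hc]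
  · simp only [if_neg hc]
    simp [show (m1 + (i : Int), m2 + (j : Int)) ∉ coord from fun h => hc (by
      simpa [Int.add_comm] using h)]

-- ===== VERDICT (by name: the statement is the Claim_ definition above) =====
theorem make_array_spec : Claim_equal_make_array := by
  intro coord _ hpre
  unfold Spec_make_array
  exact pv_main coord hpre
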